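-- pv_equiv track=rewrite | github.com/abelcarreras/gromorg | gromorg/swisparam.py | set_molecule_name
-- ===== SOURCE A (Python) =====
-- def set_molecule_name(mol2_text, resname='LIG', resnum=1):
--     lines = mol2_text.split('\n')
--     new_lines = []
--     atom_section = False
--     for line in lines:
--         if "@<TRIPOS>ATOM" in line:
--             atom_section = True
--             new_lines.append(line)
--             continue
--         if "@<TRIPOS>BOND" in line:
--             atom_section = False
--
--         if atom_section and len(line.split()) >= 8:
--             parts = line.split()
--             parts[7] = resname
--             parts[6] = '{}'.format(resnum)
--
--             formatted_line = f"{parts[0]:>7} {parts[1]:<5} {parts[2]:>10} {parts[3]:>10} {parts[4]:>10} {parts[5]:<5} {parts[6]:>3} {parts[7]:<8} {parts[8]:>10}"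
--             new_lines.append(formatted_line)
--         else:
--             new_lines.append(line)
--     return '\n'.join(new_lines)
-- ===== SOURCE B (Python) =====
-- ATOM_HEADER = '@<TRIPOS>ATOM'
-- BOND_HEADER = '@<TRIPOS>BOND'
--
--
-- def _atom_spans(lines):
--     """Half-open index ranges (start, end) of the atom sections: a section
--     begins right after an ATOM header and ends at the next BOND header
--     (a later header line implicitly ends it too), or at end of text."""
--     spans = []
--     start = None
--     for i, line in enumerate(lines):
--         if ATOM_HEADER in line:
--             if start is not None:
--                 spans.append((start, i))
--             start = i + 1
--         elif BOND_HEADER in line and start is not None: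
--             spans.append((start, i))
--             start = None
--     if start is not None:
--         spans.append((start, len(lines)))
--     return spans
--
--
-- def set_molecule_name(mol2_text, resname='LIG', resnum=1):
--     lines = mol2_text.split('\n')
--     spans = _atom_spans(lines)
--     out = []
--     for i, line in enumerate(lines):
--         parts = line.split()
--         if any(s <= i < e for s, e in spans) and len(parts) >= 9:
--             parts[6] = str(resnum)
--             parts[7] = resname
--             out.append(f"{parts[0]:>7} {parts[1]:<5} {parts[2]:>10} {parts[3]:>10} {parts[4]:>10} {parts[5]:<5} {parts[6]:>3} {parts[7]:<8} {parts[8]:>10}")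
--         else:
--             out.append(line)
--     return '\n'.join(out)
-- ===== Notes on version B (the rewrite author's own statement) =====
-- stated objective: alternative
-- what changed: Replaces A's single pass with a running boolean flag by two phases: a first pass collects the (start, end) index spans of the atom sections, a second pass rewrites exactly the lines falling in a collected span; B checks for the 9 fields its format string uses, so Pre_ excludes only the inputs where A raises IndexError (an atom-section line with exactly 8 whitespace tokens).
import Mathlib
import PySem

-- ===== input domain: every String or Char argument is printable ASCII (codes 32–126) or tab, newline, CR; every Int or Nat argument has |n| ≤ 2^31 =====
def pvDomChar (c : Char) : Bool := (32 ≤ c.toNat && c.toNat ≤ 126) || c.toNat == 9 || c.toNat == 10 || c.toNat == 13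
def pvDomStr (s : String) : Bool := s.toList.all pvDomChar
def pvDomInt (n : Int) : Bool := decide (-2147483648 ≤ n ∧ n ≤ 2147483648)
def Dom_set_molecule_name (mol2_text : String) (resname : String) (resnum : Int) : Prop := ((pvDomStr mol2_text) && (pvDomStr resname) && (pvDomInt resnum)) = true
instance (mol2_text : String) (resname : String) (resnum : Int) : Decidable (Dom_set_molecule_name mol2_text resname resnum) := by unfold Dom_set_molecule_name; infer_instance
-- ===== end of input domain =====

-- B rewrites the mol2 atom sections in two phases (collect the (start,end) index spans of the
-- atom sections, then rewrite the lines falling inside a span) instead of A's single pass with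
-- a running boolean flag; same cost, different decomposition (objective: alternative).


-- ===== PORT A =====
def pvAtomMark : List Char := "@<TRIPOS>ATOM".toList
def pvBondMark : List Char := "@<TRIPOS>BOND".toList

-- f"{s:>w}" on a str argument: right-align, pad with spaces to width w (exact for str values)
def pvPadR (w : Nat) (cs : List Char) : List Char := List.replicate (w - cs.length) ' ' ++ cs
-- f"{s:<w}": left-align, pad with spaces to width w
def pvPadL (w : Nat) (cs : List Char) : List Char := cs ++ List.replicate (w - cs.length) ' '

-- the f-string both Pythons share, with parts[7] := resname and parts[6] := str(resnum);
-- A reads parts[8] behind a 'len >= 8' check and raises IndexError when len = 8 — those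
-- inputs are excluded by Pre_set_molecule_name, so the default [] is never taken there
def pvFmtLine (parts : List (List Char)) (resname : List Char) (resnum : Int) : List Char :=
  PySem.Chars.join [' ']
    [pvPadR 7 (parts.getD 0 []), pvPadL 5 (parts.getD 1 []),
     pvPadR 10 (parts.getD 2 []), pvPadR 10 (parts.getD 3 []),
     pvPadR 10 (parts.getD 4 []), pvPadL 5 (parts.getD 5 []),
     pvPadR 3 (PySem.Int.toChars resnum), pvPadL 8 resname,
     pvPadR 10 (parts.getD 8 [])]

-- the body of A's for-loop over (atom_section, new_lines)
def pvStepA (resname : List Char) (resnum : Int) (st : Bool × List (List Char))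
    (line : List Char) : Bool × List (List Char) :=
  if PySem.Chars.isIn pvAtomMark line then (true, st.2 ++ [line])
  else
    let atom := if PySem.Chars.isIn pvBondMark line then false else st.1
    if atom = true ∧ 8 ≤ (PySem.Chars.split₀ line).length then
      (atom, st.2 ++ [pvFmtLine (PySem.Chars.split₀ line) resname resnum])
    else (atom, st.2 ++ [line])

def set_molecule_name (mol2_text : String) (resname : String) (resnum : Int) : String :=
  let lines := PySem.Chars.splitOn mol2_text.toList ['\n']
  String.mk (PySem.Chars.join ['\n']
    (lines.foldl (pvStepA resname.toList resnum) (false, [])).2)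

-- ===== PORT B =====
-- first pass (_atom_spans): fold body over enumerate(lines)
def pvSpanStep (st : List (Int × Int) × Option Int) (il : Int × List Char) :
    List (Int × Int) × Option Int :=
  if PySem.Chars.isIn pvAtomMark il.2 then
    ((match st.2 with
      | some s => st.1 ++ [(s, il.1)]
      | none => st.1), some (il.1 + 1))
  else if PySem.Chars.isIn pvBondMark il.2 then
    match st.2 with
    | some s => (st.1 ++ [(s, il.1)], none)
    | none => st
  else st

def pvSpans (lines : List (List Char)) : List (Int × Int) :=
  let st := (PySem.List.enumerate lines 0).foldl pvSpanStep ([], none)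
  match st.2 with
  | some s => st.1 ++ [(s, (lines.length : Int))]
  | none => st.1

-- any(s <= i < e for s, e in spans)
def pvInSpans (spans : List (Int × Int)) (i : Int) : Bool :=
  spans.any (fun p => decide (p.1 ≤ i ∧ i < p.2))

def set_molecule_name_alt (mol2_text : String) (resname : String) (resnum : Int) : String :=
  let lines := PySem.Chars.splitOn mol2_text.toList ['\n']
  let spans := pvSpans lines
  String.mk (PySem.Chars.join ['\n']
    ((PySem.List.enumerate lines 0).map (fun il =>
      let parts := PySem.Chars.split₀ il.2
      if pvInSpans spans il.1 ∧ 9 ≤ parts.length then pvFmtLine parts resname.toList resnum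
      else il.2)))

-- ===== PRECONDITION & SPEC =====
-- Pre_ excludes exactly the inputs on which Python A raises IndexError (parts[8] on a line
-- with exactly 8 whitespace tokens inside an active atom section): a line i (not itself an
-- ATOM marker) is active iff some earlier ATOM-marker line j is followed by no closing
-- BOND line (a BOND line without an ATOM marker) up to and including i.
def Pre_set_molecule_name (mol2_text : String) (resname : String) (resnum : Int) : Prop :=
  let lines := PySem.Chars.splitOn mol2_text.toList ['\n']
  ∀ i, i < lines.length →
    PySem.Chars.isIn pvAtomMark (lines.getD i []) = false →
    (∃ j, j < i ∧ PySem.Chars.isIn pvAtomMark (lines.getD j []) = true ∧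
      ∀ k, k < i + 1 → j < k →
        ¬ (PySem.Chars.isIn pvBondMark (lines.getD k []) = true ∧
           PySem.Chars.isIn pvAtomMark (lines.getD k []) = false)) →
    (PySem.Chars.split₀ (lines.getD i [])).length ≠ 8

instance (mol2_text : String) (resname : String) (resnum : Int) :
    Decidable (Pre_set_molecule_name mol2_text resname resnum) := by
  unfold Pre_set_molecule_name; infer_instance

def pvWitness_set_molecule_name : String × String × Int :=
  ("@<TRIPOS>ATOM\n1 C1 0.0 0.0 0.0 C.3 1 UNL 0.0\n@<TRIPOS>BOND", "LIG", 1)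

def Spec_set_molecule_name (mol2_text : String) (resname : String) (resnum : Int) (out : String) : Prop := out = set_molecule_name_alt mol2_text resname resnum
instance (mol2_text : String) (resname : String) (resnum : Int) (out : String) : Decidable (Spec_set_molecule_name mol2_text resname resnum out) := by unfold Spec_set_molecule_name; infer_instance

-- ===== CLAIM (what is proved, stated in full; the proofs are below) =====
def Claim_equal_set_molecule_name : Prop := ∀ (mol2_text : String) (resname : String) (resnum : Int), Dom_set_molecule_name mol2_text resname resnum → Pre_set_molecule_name mol2_text resname resnum → Spec_set_molecule_name mol2_text resname resnum (set_molecule_name mol2_text resname resnum)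

-- ===== LEMMAS AND PROOFS =====

-- the flag transition shared by A's loop and (implicitly) B's span collection
def pvStepFlag (f : Bool) (l : List Char) : Bool :=
  if PySem.Chars.isIn pvAtomMark l then true
  else if PySem.Chars.isIn pvBondMark l then false else f

-- A's loop, rewritten as structural recursion carrying only the flag
def pvRun (resname : List Char) (resnum : Int) (flag : Bool) :
    List (List Char) → List (List Char)
  | [] => []
  | line :: rest =>
    if PySem.Chars.isIn pvAtomMark line then line :: pvRun resname resnum true rest
    else
      let atom := if PySem.Chars.isIn pvBondMark line then false else flag
      if atom = true ∧ 8 ≤ (PySem.Chars.split₀ line).length then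
        pvFmtLine (PySem.Chars.split₀ line) resname resnum :: pvRun resname resnum atom rest
      else line :: pvRun resname resnum atom rest

theorem pvFoldl_eq_run (r : List Char) (n : Int) (ls : List (List Char)) :
    ∀ (flag : Bool) (acc : List (List Char)),
      (ls.foldl (pvStepA r n) (flag, acc)).2 = acc ++ pvRun r n flag ls := by
  induction ls with
  | nil => intro flag acc; simp [pvRun]
  | cons line rest ih =>
    intro flag acc
    simp only [List.foldl_cons, pvStepA, pvRun]
    split_ifs with h1 h2 h3 <;> simp [ih]

-- whether line k of ls is strictly inside an atom section, entering with flag f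
def pvActRun : Bool → List (List Char) → Nat → Bool
  | _, [], _ => false
  | f, l :: _, 0 =>
      f && !PySem.Chars.isIn pvAtomMark l && !PySem.Chars.isIn pvBondMark l
  | f, l :: rest, (k+1) => pvActRun (pvStepFlag f l) rest k

-- Source B's trailing 'if start is not None: spans.append((start, len(lines)))'
def pvFinalize (st : List (Int × Int) × Option Int) (n : Int) : List (Int × Int) :=
  match st.2 with
  | some s => st.1 ++ [(s, n)]
  | none => st.1

set_option maxHeartbeats 2000000 in
theorem pvSpans_cov (ls : List (List Char)) :
    ∀ (s : Int) (sp : List (Int × Int)) (stO : Option Int),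
      (∀ v, stO = some v → v ≤ s) →
      ∀ i : Int,
        (pvInSpans (pvFinalize ((PySem.List.enumerate ls s).foldl pvSpanStep (sp, stO))
            (s + ls.length)) i = true
          ↔ (pvInSpans (pvFinalize (sp, stO) s) i = true ∨
             ∃ k : Nat, k < ls.length ∧ i = s + k ∧ pvActRun stO.isSome ls k = true)) := by
  induction ls with
  | nil =>
    intro s sp stO hb i
    simp [PySem.List.enumerate_nil, pvActRun]
  | cons l rest ih =>
    intro s sp stO hb i
    rw [PySem.List.enumerate_cons, List.foldl_cons]
    have hlen : s + ((l :: rest).length : Int) = (s + 1) + (rest.length : Int) := by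
      simp; ring
    rw [hlen]
    -- split the full existential into the k = 0 and k + 1 parts
    have hsplit : (∃ k : Nat, k < (l :: rest).length ∧ i = s + k ∧
          pvActRun stO.isSome (l :: rest) k = true)
        ↔ ((i = s ∧ (stO.isSome && !PySem.Chars.isIn pvAtomMark l
              && !PySem.Chars.isIn pvBondMark l) = true) ∨
           (∃ k : Nat, k < rest.length ∧ i = (s + 1) + k ∧
              pvActRun (pvStepFlag stO.isSome l) rest k = true)) := by
      constructor
      · rintro ⟨k, hk, hi, hact⟩
        cases k with
        | zero => exact Or.inl ⟨by simpa using hi, hact⟩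
        | succ k =>
          right; exact ⟨k, by simpa using hk, by rw [hi]; push_cast; ring, hact⟩
      · rintro (⟨hi, hact⟩ | ⟨k, hk, hi, hact⟩)
        · exact ⟨0, by simp, by simpa using hi, hact⟩
        · exact ⟨k + 1, by simpa using hk, by rw [hi]; push_cast; ring, hact⟩
    rw [hsplit]
    by_cases hA : PySem.Chars.isIn pvAtomMark l = true
    · cases stO with
      | some v =>
        have hv : v ≤ s := hb v rfl
        have hstep : pvSpanStep (sp, some v) (s, l) = (sp ++ [(v, s)], some (s + 1)) := by
          simp [pvSpanStep, hA]
        rw [hstep, ih (s + 1) (sp ++ [(v, s)]) (some (s + 1)) (by intro w hw; cases hw; omega) i]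
        simp only [hA, pvFinalize, pvStepFlag, Option.isSome_some, Option.isSome_none,
          pvInSpans, List.any_append, List.any_cons, List.any_nil, Bool.or_eq_true,
          decide_eq_true_eq, Bool.and_eq_true, Bool.not_eq_true', if_true,
          Bool.true_eq_false, Bool.false_eq_true, false_and, and_false, true_and, and_true,
          false_or, or_false]
        have hD : ¬ (s + 1 ≤ i ∧ i < s + 1) := by omega
        tauto
      | none =>
        have hstep : pvSpanStep (sp, none) (s, l) = (sp, some (s + 1)) := by
          simp [pvSpanStep, hA]
        rw [hstep, ih (s + 1) sp (some (s + 1)) (by intro w hw; cases hw; omega) i]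
        simp only [hA, pvFinalize, pvStepFlag, Option.isSome_some, Option.isSome_none,
          pvInSpans, List.any_append, List.any_cons, List.any_nil, Bool.or_eq_true,
          decide_eq_true_eq, Bool.and_eq_true, Bool.not_eq_true', if_true,
          Bool.true_eq_false, Bool.false_eq_true, false_and, and_false, true_and, and_true,
          false_or, or_false]
        have hD : ¬ (s + 1 ≤ i ∧ i < s + 1) := by omega
        tauto
    · by_cases hB : PySem.Chars.isIn pvBondMark l = true
      · cases stO with
        | some v =>
          have hv : v ≤ s := hb v rfl
          have hstep : pvSpanStep (sp, some v) (s, l) = (sp ++ [(v, s)], none) := by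
            simp [pvSpanStep, hA, hB]
          rw [hstep, ih (s + 1) (sp ++ [(v, s)]) none (by intro w hw; cases hw) i]
          simp only [hA, hB, pvFinalize, pvStepFlag, Option.isSome_some, Option.isSome_none,
            pvInSpans, List.any_append, List.any_cons, List.any_nil, Bool.or_eq_true,
            decide_eq_true_eq, Bool.and_eq_true, Bool.not_eq_true', if_true, if_false,
            Bool.true_eq_false, Bool.false_eq_true, false_and, and_false, true_and, and_true,
            false_or, or_false]

        | none =>
          have hstep : pvSpanStep (sp, none) (s, l) = (sp, none) := by
            simp [pvSpanStep, hA, hB]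
          rw [hstep, ih (s + 1) sp none (by intro w hw; cases hw) i]
          simp only [hA, hB, pvFinalize, pvStepFlag, Option.isSome_some, Option.isSome_none,
            pvInSpans, List.any_append, List.any_cons, List.any_nil, Bool.or_eq_true,
            decide_eq_true_eq, Bool.and_eq_true, Bool.not_eq_true', if_true, if_false,
            Bool.true_eq_false, Bool.false_eq_true, false_and, and_false, true_and, and_true,
            false_or, or_false]

      · cases stO with
        | some v =>
          have hv : v ≤ s := hb v rfl
          have hstep : pvSpanStep (sp, some v) (s, l) = (sp, some v) := by
            simp [pvSpanStep, hA, hB]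
          rw [hstep, ih (s + 1) sp (some v) (by intro w hw; cases hw; omega) i]
          simp only [hA, hB, pvFinalize, pvStepFlag, Option.isSome_some, Option.isSome_none,
            pvInSpans, List.any_append, List.any_cons, List.any_nil, Bool.or_eq_true,
            decide_eq_true_eq, Bool.and_eq_true, Bool.not_eq_true', if_true, if_false,
            Bool.true_eq_false, Bool.false_eq_true, false_and, and_false, true_and, and_true,
            false_or, or_false]
          constructor
          · rintro ((h | h) | h)
            · exact Or.inl (Or.inl h)
            · by_cases hi : i = s
              · exact Or.inr (Or.inl hi)
              · exact Or.inl (Or.inr (by omega))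
            · exact Or.inr (Or.inr h)
          · rintro ((h | h) | h | h)
            · exact Or.inl (Or.inl h)
            · exact Or.inl (Or.inr (by omega))
            · exact Or.inl (Or.inr (by omega))
            · exact Or.inr h
        | none =>
          have hstep : pvSpanStep (sp, none) (s, l) = (sp, none) := by
            simp [pvSpanStep, hA, hB]
          rw [hstep, ih (s + 1) sp none (by intro w hw; cases hw) i]
          simp only [hA, hB, pvFinalize, pvStepFlag, Option.isSome_some, Option.isSome_none,
            pvInSpans, List.any_append, List.any_cons, List.any_nil, Bool.or_eq_true,
            decide_eq_true_eq, Bool.and_eq_true, Bool.not_eq_true', if_true, if_false,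
            Bool.true_eq_false, Bool.false_eq_true, false_and, and_false, true_and, and_true,
            false_or, or_false]

theorem pvActRun_char (ls : List (List Char)) :
    ∀ (k : Nat) (f : Bool), pvActRun f ls k = true →
      PySem.Chars.isIn pvAtomMark (ls.getD k []) = false ∧
      ((∃ j, j < k ∧ PySem.Chars.isIn pvAtomMark (ls.getD j []) = true ∧
          ∀ m, m < k + 1 → j < m →
            ¬ (PySem.Chars.isIn pvBondMark (ls.getD m []) = true ∧
               PySem.Chars.isIn pvAtomMark (ls.getD m []) = false)) ∨
       (f = true ∧ ∀ m, m < k + 1 →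
            ¬ (PySem.Chars.isIn pvBondMark (ls.getD m []) = true ∧
               PySem.Chars.isIn pvAtomMark (ls.getD m []) = false))) := by
  induction ls with
  | nil => intro k f h; simp [pvActRun] at h
  | cons l rest ih =>
    intro k f h
    cases k with
    | zero =>
      simp only [pvActRun, Bool.and_eq_true, Bool.not_eq_true'] at h
      obtain ⟨⟨hf, ha⟩, hb⟩ := h
      refine ⟨ha, Or.inr ⟨hf, ?_⟩⟩
      intro m hm
      interval_cases m
      simp [hb]
    | succ k =>
      simp only [pvActRun] at h
      obtain ⟨ha, hd⟩ := ih k (pvStepFlag f l) h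
      refine ⟨by simpa using ha, ?_⟩
      rcases hd with ⟨j, hj, haj, hno⟩ | ⟨hf, hno⟩
      · left
        refine ⟨j + 1, by omega, by simpa using haj, ?_⟩
        intro m hm hjm
        cases m with
        | zero => omega
        | succ m => simpa using hno m (by omega) (by omega)
      · -- pvStepFlag f l = true
        unfold pvStepFlag at hf
        by_cases hal : PySem.Chars.isIn pvAtomMark l = true
        · left
          refine ⟨0, by omega, by simpa using hal, ?_⟩
          intro m hm hjm
          cases m with
          | zero => omega
          | succ m => simpa using hno m (by omega)
        · by_cases hbl : PySem.Chars.isIn pvBondMark l = true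
          · simp [hal, hbl] at hf
          · right
            simp only [hal, hbl] at hf; simp at hf
            refine ⟨hf, ?_⟩
            intro m hm
            cases m with
            | zero => simp [hbl]
            | succ m => simpa using hno m (by omega)

theorem pvMain (r : List Char) (n : Int) (act : Int → Bool) :
    ∀ (ls : List (List Char)) (s : Int) (f : Bool),
      (∀ k : Nat, k < ls.length → act (s + k) = pvActRun f ls k) →
      (∀ k : Nat, k < ls.length → pvActRun f ls k = true →
          (PySem.Chars.split₀ (ls.getD k [])).length ≠ 8) →
      (PySem.List.enumerate ls s).map (fun il =>
          let parts := PySem.Chars.split₀ il.2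
          if act il.1 ∧ 9 ≤ parts.length then pvFmtLine parts r n else il.2)
        = pvRun r n f ls := by
  intro ls
  induction ls with
  | nil => intro s f _ _; simp [PySem.List.enumerate_nil, pvRun]
  | cons l rest ih =>
    intro s f hact hlen
    rw [PySem.List.enumerate_cons, List.map_cons]
    have h0 : act s = pvActRun f (l :: rest) 0 := by simpa using hact 0 (by simp)
    have hrec : (PySem.List.enumerate rest (s + 1)).map (fun il =>
          let parts := PySem.Chars.split₀ il.2
          if act il.1 ∧ 9 ≤ parts.length then pvFmtLine parts r n else il.2)
        = pvRun r n (pvStepFlag f l) rest := by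
      apply ih (s + 1) (pvStepFlag f l)
      · intro k hk
        have := hact (k + 1) (by simpa using hk)
        simpa [pvActRun, add_assoc, add_comm, add_left_comm] using this
      · intro k hk h
        have := hlen (k + 1) (by simpa using hk)
        simpa [pvActRun] using this h
    by_cases hA : PySem.Chars.isIn pvAtomMark l = true
    · have : act s = false := by simp [h0, pvActRun, hA]
      simp only [pvRun, hA, if_true]
      simp only [this, false_and, if_false, Bool.false_eq_true]
      rw [hrec]
      simp [pvStepFlag, hA]
    · by_cases hB : PySem.Chars.isIn pvBondMark l = true
      · have ha : act s = false := by simp [h0, pvActRun, hA, hB]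
        simp only [pvRun, hA, hB]
        simp only [ha, false_and, if_false, Bool.false_eq_true]
        rw [hrec]
        simp [pvStepFlag, hA, hB]
      · have hstep : pvStepFlag f l = f := by simp [pvStepFlag, hA, hB]
        have ha : act s = f := by simp [h0, pvActRun, hA, hB]
        cases f with
        | false =>
          simp only [pvRun, hA, hB]
          simp only [ha, false_and, if_false, Bool.false_eq_true]
          rw [hrec, hstep]

        | true =>
          have h8 : (PySem.Chars.split₀ l).length ≠ 8 := by
            apply hlen 0 (by simp)
            simp [pvActRun, hA, hB]
          simp only [pvRun, hA, hB]
          rw [hrec, hstep]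
          simp only [ha, true_and]
          by_cases h9 : 9 ≤ (PySem.Chars.split₀ l).length
          · have h8' : 8 ≤ (PySem.Chars.split₀ l).length := by omega
            simp [hA, h9, h8', if_true]
          · have h8' : ¬ (8 ≤ (PySem.Chars.split₀ l).length) := by omega
            simp [hA, h9, h8']

theorem pvInSpans_pvSpans (lines : List (List Char)) (k : Nat) (hk : k < lines.length) :
    pvInSpans (pvSpans lines) ((k : Nat) : Int) = pvActRun false lines k := by
  have hcov := pvSpans_cov lines 0 [] none (by intro v hv; cases hv) ((k : Nat) : Int)
  simp only [Option.isSome_none] at hcov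
  have h0 : pvSpans lines
      = pvFinalize ((PySem.List.enumerate lines 0).foldl pvSpanStep ([], none))
          ((0 : Int) + lines.length) := by
    simp only [pvSpans, pvFinalize, zero_add]
  rw [h0]
  cases hEq : pvActRun false lines k with
  | true => exact hcov.mpr (Or.inr ⟨k, hk, by push_cast; ring, hEq⟩)
  | false =>
    by_contra hne
    have htrue : pvInSpans (pvFinalize ((PySem.List.enumerate lines 0).foldl pvSpanStep
        ([], none)) ((0 : Int) + lines.length)) ((k : Nat) : Int) = true := by
      cases hx : pvInSpans (pvFinalize ((PySem.List.enumerate lines 0).foldl pvSpanStep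
          ([], none)) ((0 : Int) + lines.length)) ((k : Nat) : Int)
      · exact absurd hx hne
      · rfl
    rcases hcov.mp htrue with h | ⟨k', _, hik, hact⟩
    · simp [pvInSpans, pvFinalize] at h
    · have : k = k' := by omega
      rw [this, hact] at hEq; cases hEq

-- ===== VERDICT (by name: the statement is the Claim_ definition above) =====
theorem set_molecule_name_spec : Claim_equal_set_molecule_name := by
  intro mol2_text resname resnum _hdom hpre
  unfold Spec_set_molecule_name set_molecule_name set_molecule_name_alt
  show String.mk (PySem.Chars.join ['\n']
      (List.foldl (pvStepA resname.toList resnum) (false, [])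
        (PySem.Chars.splitOn mol2_text.toList ['\n'])).2)
    = String.mk (PySem.Chars.join ['\n']
      (List.map (fun il =>
          let parts := PySem.Chars.split₀ il.2
          if pvInSpans (pvSpans (PySem.Chars.splitOn mol2_text.toList ['\n'])) il.1 = true
              ∧ 9 ≤ parts.length
          then pvFmtLine parts resname.toList resnum else il.2)
        (PySem.List.enumerate (PySem.Chars.splitOn mol2_text.toList ['\n']))))
  rw [pvFoldl_eq_run resname.toList resnum _ false []]
  rw [pvMain resname.toList resnum
      (fun i => pvInSpans (pvSpans (PySem.Chars.splitOn mol2_text.toList ['\n'])) i)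
      (PySem.Chars.splitOn mol2_text.toList ['\n']) 0 false ?h1 ?h2]
  · rw [List.nil_append]
  case h1 =>
    intro k hk
    simpa using pvInSpans_pvSpans (PySem.Chars.splitOn mol2_text.toList ['\n']) k hk
  case h2 =>
    intro k hk hact
    obtain ⟨hatom, hd⟩ := pvActRun_char (PySem.Chars.splitOn mol2_text.toList ['\n']) k false hact
    rcases hd with ⟨j, hj, haj, hno⟩ | ⟨hf, _⟩
    · exact hpre k hk hatom ⟨j, hj, haj, hno⟩
    · cases hf
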